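-- pv_equiv track=rewrite | github.com/efogdev/wirelessifier | docs/battery/plot_log.py | calculate_boot_offsets
-- ===== SOURCE A (Python) =====
-- def calculate_boot_offsets(timestamps):
--     if not timestamps:
--         return []
--
--     offsets = [0]
--     current_offset = 0
--
--     for i in range(1, len(timestamps)):
--         if timestamps[i] < timestamps[i-1]:
--             current_offset += timestamps[i-1]
--         offsets.append(current_offset)
--
--     return offsets
-- ===== SOURCE B (Python) =====
-- def calculate_boot_offsets(timestamps):
--     n = len(timestamps)
--     if n == 0:
--         return []
--     # The offsets are piecewise constant: they only change at reset positions.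
--     # Find the reset positions once, then emit the output as constant runs.
--     resets = [i for i in range(1, n) if timestamps[i] < timestamps[i - 1]]
--     out = []
--     total = 0
--     start = 0
--     for r in resets:
--         out += [total] * (r - start)
--         total += timestamps[r - 1]
--         start = r
--     out += [total] * (n - start)
--     return out
-- ===== Notes on version B (the rewrite author's own statement) =====
-- stated objective: alternative
-- what changed: Exploits that the offsets are piecewise constant: B first collects the reset positions, then builds the output as concatenated constant runs (one list-replication per segment), instead of A's per-element accumulator loop that appends one offset per index.
import Mathlib
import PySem

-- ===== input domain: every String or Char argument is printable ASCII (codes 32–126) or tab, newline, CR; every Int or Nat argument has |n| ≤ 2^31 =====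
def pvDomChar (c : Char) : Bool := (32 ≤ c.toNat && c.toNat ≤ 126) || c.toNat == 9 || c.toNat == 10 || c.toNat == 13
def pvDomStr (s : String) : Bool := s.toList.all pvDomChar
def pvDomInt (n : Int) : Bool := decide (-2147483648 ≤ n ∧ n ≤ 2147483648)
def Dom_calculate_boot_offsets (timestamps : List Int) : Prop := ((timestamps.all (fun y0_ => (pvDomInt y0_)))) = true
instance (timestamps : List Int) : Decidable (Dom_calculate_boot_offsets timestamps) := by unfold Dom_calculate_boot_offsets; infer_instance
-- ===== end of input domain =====

-- B replaces A's per-element accumulator loop by a run-length construction over the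
-- reset positions (the offsets are piecewise constant); alternative, same cost.


-- ===== PORT A =====
-- A: fused loop over indices 1..n-1, accumulating the offset and appending it each step.
def calculate_boot_offsets (timestamps : List Int) : List Int :=
  if timestamps = [] then []
  else
    ((PySem.List.pyRange 1 (timestamps.length : Int) 1).foldl
      (fun (st : List Int × Int) (i : Int) =>
        let cur : Int :=
          if PySem.List.pyGetD timestamps i 0 < PySem.List.pyGetD timestamps (i - 1) 0
          then st.2 + PySem.List.pyGetD timestamps (i - 1) 0 else st.2
        (st.1 ++ [cur], cur)) ([0], 0)).1

-- ===== PORT B =====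
-- B: collect the reset positions once, then emit the output as concatenated constant
-- runs, one list-replication per segment.  '[x] * m' is List.replicate m.toNat x (exact:
-- Python's list repetition with a non-positive count is empty).  State: (out, total, start).
def calculate_boot_offsets_alt (timestamps : List Int) : List Int :=
  let n := timestamps.length
  if n = 0 then []
  else
    let resets : List Int := (PySem.List.pyRange 1 (n : Int) 1).filter
      (fun i => PySem.List.pyGetD timestamps i 0 < PySem.List.pyGetD timestamps (i - 1) 0)
    let st := resets.foldl
      (fun (st : List Int × Int × Int) (r : Int) =>
        (st.1 ++ List.replicate (r - st.2.2).toNat st.2.1,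
         st.2.1 + PySem.List.pyGetD timestamps (r - 1) 0,
         r))
      ([], 0, 0)
    st.1 ++ List.replicate ((n : Int) - st.2.2).toNat st.2.1

-- ===== PRECONDITION & SPEC =====
def Spec_calculate_boot_offsets (timestamps : List Int) (out : List Int) : Prop := out = calculate_boot_offsets_alt timestamps
instance (timestamps : List Int) (out : List Int) : Decidable (Spec_calculate_boot_offsets timestamps out) := by unfold Spec_calculate_boot_offsets; infer_instance

-- ===== CLAIM (what is proved, stated in full; the proofs are below) =====
def Claim_equal_calculate_boot_offsets : Prop := ∀ (timestamps : List Int), Dom_calculate_boot_offsets timestamps → Spec_calculate_boot_offsets timestamps (calculate_boot_offsets timestamps)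

-- ===== LEMMAS AND PROOFS =====

-- The common reference value: pvF ts k = offset at index k (sum of ts[j-1] over descents j ≤ k).
def pvF (ts : List Int) : Nat → Int
  | 0 => 0
  | k + 1 => pvF ts k + (if ts.getD (k + 1) 0 < ts.getD k 0 then ts.getD k 0 else 0)

-- A's loop state after processing indices 1..m-1.
theorem pvA_inv (ts : List Int) (m : Nat) (h1 : 1 ≤ m) :
    (PySem.List.pyRange 1 (m : Int) 1).foldl
      (fun (st : List Int × Int) (i : Int) =>
        (st.1 ++ [if PySem.List.pyGetD ts i 0 < PySem.List.pyGetD ts (i - 1) 0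
                  then st.2 + PySem.List.pyGetD ts (i - 1) 0 else st.2],
         if PySem.List.pyGetD ts i 0 < PySem.List.pyGetD ts (i - 1) 0
         then st.2 + PySem.List.pyGetD ts (i - 1) 0 else st.2)) ([0], 0)
    = ((List.range m).map (pvF ts), pvF ts (m - 1)) := by
  induction m with
  | zero => omega
  | succ k ih =>
    by_cases hk : k = 0
    · subst hk
      rw [PySem.List.pyRange_one_eq_nil (by norm_num)]
      simp [pvF]
    · have hk1 : 1 ≤ k := by omega
      have hcast : ((k + 1 : Nat) : Int) = (k : Int) + 1 := by push_cast; ring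
      rw [hcast, PySem.List.pyRange_one_succ_right (by exact_mod_cast hk1),
        List.foldl_append, ih hk1]
      have hkm : ((k : Int) - 1) = ((k - 1 : Nat) : Int) := by omega
      simp only [List.foldl_cons, List.foldl_nil, hkm, PySem.List.pyGetD_natCast]
      have hkeq : k = (k - 1) + 1 := by omega
      have hpv : pvF ts k = pvF ts (k - 1) +
          (if ts.getD k 0 < ts.getD (k - 1) 0 then ts.getD (k - 1) 0 else 0) := by
        conv_lhs => rw [hkeq]
        rw [pvF]
        rw [← hkeq]
      rw [List.range_succ, List.map_append]
      simp [hpv]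
      split <;> simp

-- No descent strictly after s up to k ⟹ the offset is still pvF ts s at k.
theorem pvF_const (ts : List Int) (s : Nat) (k : Nat) (hsk : s ≤ k)
    (h : ∀ j, s < j → j ≤ k → ¬(ts.getD j 0 < ts.getD (j - 1) 0)) :
    pvF ts k = pvF ts s := by
  induction k with
  | zero =>
    have hs0 : s = 0 := by omega
    rw [hs0]
  | succ m ih =>
    by_cases hsm : s = m + 1
    · rw [hsm]
    · have hsm' : s ≤ m := by omega
      rw [pvF]
      have hnd := h (m + 1) (by omega) (by omega)
      simp only [Nat.add_sub_cancel] at hnd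
      rw [if_neg hnd, add_zero]
      exact ih hsm' (fun j hj1 hj2 => h j hj1 (by omega))

-- A descent at r, none in between ⟹ the offset jumps to pvF ts s + ts[r-1].
theorem pvF_jump (ts : List Int) (s r : Nat) (hsr : s < r)
    (hd : ts.getD r 0 < ts.getD (r - 1) 0)
    (h : ∀ j, s < j → j < r → ¬(ts.getD j 0 < ts.getD (j - 1) 0)) :
    pvF ts r = pvF ts s + ts.getD (r - 1) 0 := by
  have hr : r = (r - 1) + 1 := by omega
  conv_lhs => rw [hr]
  rw [pvF, ← hr]
  rw [if_pos hd]
  congr 1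
  exact pvF_const ts s (r - 1) (by omega) (fun j h1 h2 => h j h1 (by omega))

-- Constant segment: the map of pvF over a descent-free run is a replicate.
theorem pvF_replicate (ts : List Int) (s m : Nat)
    (h : ∀ j, s < j → j < s + m → ¬(ts.getD j 0 < ts.getD (j - 1) 0)) :
    (List.range' s m).map (pvF ts) = List.replicate m (pvF ts s) := by
  rw [List.eq_replicate_iff]
  constructor
  · simp
  · intro b hb
    simp only [List.mem_map, List.mem_range'_1] at hb
    obtain ⟨k, ⟨hk1, hk2⟩, rfl⟩ := hb
    exact pvF_const ts s k hk1 (fun j h1 h2 => h j h1 (by omega))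

-- Characterising a cons-shaped filter of a contiguous range.
theorem pv_filter_range'_cons {p : Nat → Bool} {a len r : Nat} {rs' : List Nat}
    (h : (List.range' a len).filter p = r :: rs') :
    a ≤ r ∧ r < a + len ∧ p r = true ∧ (∀ k, a ≤ k → k < r → p k = false) ∧
      rs' = (List.range' (r + 1) (a + len - (r + 1))).filter p := by
  induction len generalizing a with
  | zero => simp at h
  | succ m ih =>
    rw [List.range'_succ, List.filter_cons] at h
    by_cases hp : p a
    · simp only [hp, if_pos] at h
      obtain ⟨rfl, rfl⟩ : a = r ∧ (List.range' (a + 1) m).filter p = rs' := by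
        cases h; exact ⟨rfl, rfl⟩
      refine ⟨le_refl _, by omega, hp, fun k h1 h2 => by omega, ?_⟩
      have : a + (m + 1) - (a + 1) = m := by omega
      rw [this]
    · simp only [hp] at h
      simp only [Bool.false_eq_true, if_false] at h
      obtain ⟨h1, h2, h3, h4, h5⟩ := ih h
      refine ⟨by omega, by omega, h3, ?_, ?_⟩
      · intro k hk1 hk2
        by_cases hka : k = a
        · subst hka; simp [hp]
        · exact h4 k (by omega) hk2
      · have : a + 1 + m = a + (m + 1) := by omega
        rw [this] at h5
        exact h5

-- A nil filter of a contiguous range means the predicate is false throughout.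
theorem pv_filter_range'_nil {p : Nat → Bool} {a len : Nat}
    (h : (List.range' a len).filter p = []) :
    ∀ k, a ≤ k → k < a + len → p k = false := by
  intro k h1 h2
  have := List.filter_eq_nil_iff.mp h k (List.mem_range'_1.mpr ⟨h1, h2⟩)
  simpa using this

-- Factor a prefix of the output list out of B's fold.
theorem pvB_out (ts : List Int) (rs : List Int) :
    ∀ (out : List Int) (tot s : Int),
    rs.foldl
      (fun (st : List Int × Int × Int) (r : Int) =>
        (st.1 ++ List.replicate (r - st.2.2).toNat st.2.1,
         st.2.1 + PySem.List.pyGetD ts (r - 1) 0, r)) (out, tot, s)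
    = (out ++ (rs.foldl
        (fun (st : List Int × Int × Int) (r : Int) =>
          (st.1 ++ List.replicate (r - st.2.2).toNat st.2.1,
           st.2.1 + PySem.List.pyGetD ts (r - 1) 0, r)) ([], tot, s)).1,
       (rs.foldl
        (fun (st : List Int × Int × Int) (r : Int) =>
          (st.1 ++ List.replicate (r - st.2.2).toNat st.2.1,
           st.2.1 + PySem.List.pyGetD ts (r - 1) 0, r)) ([], tot, s)).2) := by
  induction rs with
  | nil => intro out tot s; simp
  | cons r rs ih =>
    intro out tot s
    simp only [List.foldl_cons, List.nil_append]
    rw [ih (out ++ List.replicate (r - s).toNat tot), ih (List.replicate (r - s).toNat tot)]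
    simp [List.append_assoc]

-- Main segment invariant of B's fold.
theorem pvB_main (ts : List Int) (n : Nat) :
    ∀ (rs : List Nat) (s : Nat), s < n →
    rs = (List.range' (s + 1) (n - (s + 1))).filter
      (fun k => decide (ts.getD k 0 < ts.getD (k - 1) 0)) →
    ((rs.map (fun k : Nat => (k : Int))).foldl
        (fun (st : List Int × Int × Int) (r : Int) =>
          (st.1 ++ List.replicate (r - st.2.2).toNat st.2.1,
           st.2.1 + PySem.List.pyGetD ts (r - 1) 0, r)) ([], pvF ts s, (s : Int))).1
      ++ List.replicate ((n : Int) -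
          ((rs.map (fun k : Nat => (k : Int))).foldl
            (fun (st : List Int × Int × Int) (r : Int) =>
              (st.1 ++ List.replicate (r - st.2.2).toNat st.2.1,
               st.2.1 + PySem.List.pyGetD ts (r - 1) 0, r)) ([], pvF ts s, (s : Int))).2.2).toNat
          ((rs.map (fun k : Nat => (k : Int))).foldl
            (fun (st : List Int × Int × Int) (r : Int) =>
              (st.1 ++ List.replicate (r - st.2.2).toNat st.2.1,
               st.2.1 + PySem.List.pyGetD ts (r - 1) 0, r)) ([], pvF ts s, (s : Int))).2.1
    = (List.range' s (n - s)).map (pvF ts) := by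
  intro rs
  induction rs with
  | nil =>
    intro s hs hrs
    have hnd := pv_filter_range'_nil hrs.symm
    simp only [List.map_nil, List.foldl_nil]
    have hcast : (((n : Int) - (s : Int))).toNat = n - s := by omega
    rw [hcast]
    rw [pvF_replicate ts s (n - s) (fun j h1 h2 => by
      have := hnd j (by omega) (by omega)
      simpa using this)]
    simp
  | cons r rs ih =>
    intro s hs hrs
    obtain ⟨h1, h2, h3, h4, h5⟩ := pv_filter_range'_cons hrs.symm
    have hrn : r < n := by omega
    have hdesc : ts.getD r 0 < ts.getD (r - 1) 0 := by simpa using h3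
    have hnone : ∀ j, s < j → j < r → ¬(ts.getD j 0 < ts.getD (j - 1) 0) := by
      intro j hj1 hj2
      have := h4 j (by omega) hj2
      simpa using this
    simp only [List.map_cons, List.foldl_cons, List.nil_append]
    have hc1 : ((r : Int) - (s : Int)).toNat = r - s := by omega
    have hc2 : ((r : Int) - 1) = ((r - 1 : Nat) : Int) := by omega
    rw [hc1, hc2, PySem.List.pyGetD_natCast]
    have hjump : pvF ts s + ts.getD (r - 1) 0 = pvF ts r :=
      (pvF_jump ts s r (by omega) hdesc hnone).symm
    rw [hjump]
    rw [pvB_out]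
    dsimp only
    have h5' : rs = (List.range' (r + 1) (n - (r + 1))).filter
        (fun k => decide (ts.getD k 0 < ts.getD (k - 1) 0)) := by
      have heq : s + 1 + (n - (s + 1)) - (r + 1) = n - (r + 1) := by omega
      rw [h5, heq]
    rw [List.append_assoc]
    rw [ih r hrn h5']
    rw [← pvF_replicate ts s (r - s) (fun j hj1 hj2 => hnone j hj1 (by omega))]
    have hsplit : List.range' s (n - s) = List.range' s (r - s) ++ List.range' r (n - r) := by
      have h' : s + (r - s) = r := by omega
      have h'' : (r - s) + (n - r) = n - s := by omega
      rw [← h'']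
      rw [← List.range'_append_1]
      rw [h']
    rw [hsplit, List.map_append]

-- B's reset list, rewritten as a cast of the Nat-level filter.
theorem pv_resets_cast (ts : List Int) (n : Nat) (hn : 1 ≤ n) :
    (PySem.List.pyRange 1 (n : Int) 1).filter
      (fun i => PySem.List.pyGetD ts i 0 < PySem.List.pyGetD ts (i - 1) 0)
    = ((List.range' 1 (n - 1)).filter
        (fun k => decide (ts.getD k 0 < ts.getD (k - 1) 0))).map (fun k : Nat => (k : Int)) := by
  have hrng : PySem.List.pyRange 1 (n : Int) 1
      = (List.range' 1 (n - 1)).map (fun k : Nat => (k : Int)) := by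
    rw [PySem.List.pyRange_one, List.range'_eq_map_range, List.map_map]
    have : (((n : Int)) - 1).toNat = n - 1 := by omega
    rw [this]
    apply List.map_congr_left
    intro k _
    simp only [Function.comp_apply]
    push_cast
    ring
  rw [hrng, List.filter_map]
  congr 1
  apply List.filter_congr
  intro k hk
  have hk1 : 1 ≤ k := (List.mem_range'_1.mp hk).1
  have hc : ((k : Int) - 1) = ((k - 1 : Nat) : Int) := by omega
  simp only [Function.comp, hc, PySem.List.pyGetD_natCast]

-- ===== VERDICT (by name: the statement is the Claim_ definition above) =====
theorem calculate_boot_offsets_spec : Claim_equal_calculate_boot_offsets := by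
  intro ts _
  unfold Spec_calculate_boot_offsets
  cases ts with
  | nil => rfl
  | cons x xs =>
    have hne : (x :: xs : List Int) ≠ [] := List.cons_ne_nil x xs
    have hn : 1 ≤ (x :: xs).length := by simp
    have hlen : ¬ ((x :: xs).length = 0) := by simp
    simp only [calculate_boot_offsets, calculate_boot_offsets_alt, if_neg hne, if_neg hlen]
    rw [pvA_inv (x :: xs) (x :: xs).length hn]
    rw [pv_resets_cast (x :: xs) (x :: xs).length hn]
    dsimp only
    have hB := pvB_main (x :: xs) (x :: xs).length
      ((List.range' 1 ((x :: xs).length - 1)).filter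
        (fun k => decide ((x :: xs).getD k 0 < (x :: xs).getD (k - 1) 0)))
      0 (by simp) (by rfl)
    simp only [pvF, Nat.cast_zero] at hB
    rw [hB, List.range_eq_range', Nat.sub_zero]
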